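-- pv_equiv track=rewrite | github.com/selfreferencing/erdos-86-lean | gen_lean_new_cases.py | ordered_factorizations_3
-- ===== SOURCE A (Python) =====
-- def ordered_factorizations_3(n):
--     """Return all ordered triples (a, r, s) with a*r*s = n, a,r,s >= 1."""
--     result = []
--     for a in range(1, n + 1):
--         if n % a != 0:
--             continue
--         rem = n // a
--         for r in range(1, rem + 1):
--             if rem % r != 0:
--                 continue
--             s = rem // r
--             result.append((a, r, s))
--     return result
-- ===== SOURCE B (Python) =====
-- def _divisors(n):
--     """Divisors of n in ascending order, found in O(sqrt(n)) by pairing d with n//d."""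
--     small, large = [], []
--     d = 1
--     while d * d <= n:
--         if n % d == 0:
--             small.append(d)
--             q = n // d
--             if d != q:
--                 large.append(q)
--         d += 1
--     return small + large[::-1]
--
--
-- def _factor_tuples(n, k):
--     """All ordered k-tuples of factors >= 1 with product n, lexicographically."""
--     if k == 1:
--         return [(n,)]
--     return [(d,) + rest for d in _divisors(n) for rest in _factor_tuples(n // d, k - 1)]
--
--
-- def ordered_factorizations_3(n):
--     """Return all ordered triples (a, r, s) with a*r*s = n, a,r,s >= 1."""
--     return _factor_tuples(n, 3)
-- ===== Notes on version B (the rewrite author's own statement) =====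
-- stated objective: faster
-- what changed: B finds divisors by trial division only up to sqrt(n), pairing each small divisor d with its cofactor n//d (small list + reversed large list), and builds the triples by a general recursive k-tuple factorization over those divisor lists instead of A's two nested full-range scans.
import Mathlib
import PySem

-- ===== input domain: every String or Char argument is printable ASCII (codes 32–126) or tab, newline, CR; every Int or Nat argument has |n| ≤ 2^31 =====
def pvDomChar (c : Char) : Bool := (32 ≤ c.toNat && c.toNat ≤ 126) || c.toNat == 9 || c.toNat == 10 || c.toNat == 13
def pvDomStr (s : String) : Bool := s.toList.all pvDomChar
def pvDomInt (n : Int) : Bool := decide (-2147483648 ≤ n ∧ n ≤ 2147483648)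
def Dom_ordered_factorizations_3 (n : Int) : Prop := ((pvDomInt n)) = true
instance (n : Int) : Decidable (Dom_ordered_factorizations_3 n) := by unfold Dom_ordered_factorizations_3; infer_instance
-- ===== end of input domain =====

-- B enumerates divisors by trial division only up to sqrt(n) (pairing each small divisor d with
-- its cofactor n//d) and builds the triples by a recursive k-tuple factorization over those
-- divisor lists; measurably faster than A's nested full-range scans, same values.

-- ===== PORT A =====
def ordered_factorizations_3 (n : Int) : List (List Int) :=
  (PySem.List.pyRange 1 (n + 1) 1).foldl (fun result a =>
    if PySem.Int.mod n a ≠ 0 then result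
    else
      let rem := PySem.Int.floordiv n a
      (PySem.List.pyRange 1 (rem + 1) 1).foldl (fun result r =>
        if PySem.Int.mod rem r ≠ 0 then result
        else result ++ [[a, r, PySem.Int.floordiv rem r]]) result) []

-- ===== PORT B =====
-- the while loop of _divisors: d from 1 while d*d <= n, collecting small divisors and cofactors
def pvDivisorsAux (n d : Int) (small large : List Int) : List Int :=
  if h : d * d ≤ n then
    if PySem.Int.mod n d = 0 then
      let q := PySem.Int.floordiv n d
      if d ≠ q then pvDivisorsAux n (d + 1) (small ++ [d]) (large ++ [q])
      else pvDivisorsAux n (d + 1) (small ++ [d]) large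
    else pvDivisorsAux n (d + 1) small large
  else small ++ large.reverse
termination_by (n + 1 - d).toNat
decreasing_by
  all_goals
    have hd : d ≤ n := by nlinarith [sq_nonneg (d - 1)]
    omega

-- _divisors(n): small + large[::-1]
def pvDivisors (n : Int) : List Int := pvDivisorsAux n 1 [] []

-- _factor_tuples(n, k): k == 1 returns [(n,)], else the comprehension over _divisors(n)
def pvFactorTuples : Int → Nat → List (List Int)
  | _, 0 => []          -- never called by the entry (Python's k is always ≥ 1)
  | n, 1 => [[n]]
  | n, (m + 2) =>
      (pvDivisors n).flatMap (fun d =>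
        (pvFactorTuples (PySem.Int.floordiv n d) (m + 1)).map (fun rest => d :: rest))

def ordered_factorizations_3_alt (n : Int) : List (List Int) := pvFactorTuples n 3

-- ===== PRECONDITION & SPEC =====
def Spec_ordered_factorizations_3 (n : Int) (out : List (List Int)) : Prop := out = ordered_factorizations_3_alt n
instance (n : Int) (out : List (List Int)) : Decidable (Spec_ordered_factorizations_3 n out) := by unfold Spec_ordered_factorizations_3; infer_instance

-- ===== CLAIM (what is proved, stated in full; the proofs are below) =====
def Claim_equal_ordered_factorizations_3 : Prop := ∀ (n : Int), Dom_ordered_factorizations_3 n → Spec_ordered_factorizations_3 n (ordered_factorizations_3 n)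

-- ===== LEMMAS AND PROOFS =====

-- the ascending divisor list A's loops effectively range over
def pvDivList (n : Int) : List Int :=
  (PySem.List.pyRange 1 (n + 1) 1).filter (fun x => decide (PySem.Int.mod n x = 0))

-- the small-divisor and paired-cofactor segments still to be collected from d upwards
def pvSm (n d : Int) : List Int :=
  (PySem.List.pyRange d (n + 1) 1).filter
    (fun x => decide (PySem.Int.mod n x = 0) && decide (x * x ≤ n))

def pvLg (n d : Int) : List Int :=
  ((PySem.List.pyRange d (n + 1) 1).filter
    (fun x => decide (PySem.Int.mod n x = 0) && decide (x * x ≤ n)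
      && decide (x ≠ PySem.Int.floordiv n x))).map (fun x => PySem.Int.floordiv n x)

lemma pvSm_nil {n d : Int} (hd : 1 ≤ d) (h : ¬ d * d ≤ n) : pvSm n d = [] := by
  apply List.filter_eq_nil_iff.mpr
  intro x hx
  rw [PySem.List.mem_pyRange_one] at hx
  simp only [Bool.and_eq_true, decide_eq_true_iff, not_and]
  intro _
  nlinarith

lemma pvLg_nil {n d : Int} (hd : 1 ≤ d) (h : ¬ d * d ≤ n) : pvLg n d = [] := by
  unfold pvLg
  rw [List.map_eq_nil_iff]
  apply List.filter_eq_nil_iff.mpr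
  intro x hx
  rw [PySem.List.mem_pyRange_one] at hx
  simp only [Bool.and_eq_true, decide_eq_true_iff, not_and]
  intro _ hxx
  nlinarith

lemma pvRange_cons {n d : Int} (hd : 1 ≤ d) (h : d * d ≤ n) :
    PySem.List.pyRange d (n + 1) 1 = d :: PySem.List.pyRange (d + 1) (n + 1) 1 :=
  PySem.List.pyRange_one_cons (by nlinarith)

lemma aux_inv (n : Int) (d : Int) (small large : List Int) : 1 ≤ d →
    pvDivisorsAux n d small large = (small ++ pvSm n d) ++ (large ++ pvLg n d).reverse := by
  induction d, small, large using pvDivisorsAux.induct (n := n) with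
  | case1 d small large h hmod q hq ih =>
    intro hd
    have hq' : ¬ d = PySem.Int.floordiv n d := hq
    rw [pvDivisorsAux]
    simp only [h, hmod, dif_pos, if_pos]
    rw [ih (by omega)]
    unfold pvSm pvLg
    rw [pvRange_cons hd h]
    simp [hmod, h, hq']
    rfl
  | case2 d small large h hmod q hq ih =>
    intro hd
    have hq' : d = PySem.Int.floordiv n d := not_not.mp hq
    rw [pvDivisorsAux]
    simp only [h, hmod, dif_pos, if_pos]
    rw [ih (by omega)]
    unfold pvSm pvLg
    rw [pvRange_cons hd h]
    simp [hmod, h, ← hq']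
  | case3 d small large h hmod ih =>
    intro hd
    rw [pvDivisorsAux]
    simp only [h, hmod, dif_pos]
    rw [ih (by omega)]
    unfold pvSm pvLg
    rw [pvRange_cons hd h]
    simp [hmod]
  | case4 d small large h =>
    intro hd
    rw [pvDivisorsAux]
    simp [h, pvSm_nil hd h, pvLg_nil hd h]

lemma div_mul_cancel' {n x : Int} (hx : 1 ≤ x) (hd : x ∣ n) :
    PySem.Int.floordiv n x * x = n := by
  rw [PySem.Int.floordiv_eq_ediv_of_pos (by omega)]
  exact Int.ediv_mul_cancel hd

lemma div_pos' {n x : Int} (hn : 1 ≤ n) (hx : 1 ≤ x) (hd : x ∣ n) :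
    1 ≤ PySem.Int.floordiv n x := by
  have h := div_mul_cancel' hx hd
  nlinarith

lemma mem_pvDivisors {n x : Int} (hn : 1 ≤ n) :
    x ∈ pvDivisors n ↔ 1 ≤ x ∧ x ∣ n := by
  unfold pvDivisors
  rw [aux_inv n 1 [] [] le_rfl]
  simp only [List.nil_append, List.mem_append, List.mem_reverse]
  unfold pvSm pvLg
  simp only [List.mem_map, List.mem_filter, PySem.List.mem_pyRange_one,
    Bool.and_eq_true, decide_eq_true_iff, PySem.Int.mod_eq_zero_iff_dvd]
  constructor
  · rintro (⟨⟨h1, _⟩, hdvd, _⟩ | ⟨dd, ⟨⟨hd1, _⟩, ⟨hdvd, hddn⟩, _⟩, rfl⟩)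
    · exact ⟨h1, hdvd⟩
    · have hmul := div_mul_cancel' hd1 hdvd
      have hpos := div_pos' hn hd1 hdvd
      exact ⟨hpos, ⟨dd, by linarith [hmul]⟩⟩
  · rintro ⟨hx1, hdvd⟩
    have hxn : x ≤ n := Int.le_of_dvd (by omega) hdvd
    by_cases hxx : x * x ≤ n
    · exact Or.inl ⟨⟨hx1, by omega⟩, hdvd, hxx⟩
    · right
      refine ⟨PySem.Int.floordiv n x, ⟨?_, ⟨?_, ?_⟩, ?_⟩, ?_⟩
      · set dd := PySem.Int.floordiv n x with hdd
        have hmul := div_mul_cancel' hx1 hdvd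
        have hpos := div_pos' hn hx1 hdvd
        constructor
        · exact hpos
        · nlinarith
      · set dd := PySem.Int.floordiv n x with hdd
        have hmul := div_mul_cancel' hx1 hdvd
        exact ⟨x, by linarith⟩
      · set dd := PySem.Int.floordiv n x with hdd
        have hmul := div_mul_cancel' hx1 hdvd
        have hpos := div_pos' hn hx1 hdvd
        nlinarith
      · set dd := PySem.Int.floordiv n x with hdd
        have hmul := div_mul_cancel' hx1 hdvd
        have hpos := div_pos' hn hx1 hdvd
        have hdvd' : dd ∣ n := ⟨x, by linarith⟩
        have hx' : PySem.Int.floordiv n dd = x := by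
          have h2 := div_mul_cancel' hpos hdvd'
          nlinarith [div_pos' hn hpos hdvd']
        rw [hx']
        nlinarith
      · set dd := PySem.Int.floordiv n x with hdd
        have hmul := div_mul_cancel' hx1 hdvd
        have hpos := div_pos' hn hx1 hdvd
        have hdvd' : dd ∣ n := ⟨x, by linarith⟩
        have h2 := div_mul_cancel' hpos hdvd'
        nlinarith [div_pos' hn hpos hdvd']

lemma pairwise_pvDivisors (n : Int) : (pvDivisors n).Pairwise (· < ·) := by
  unfold pvDivisors
  rw [aux_inv n 1 [] [] le_rfl]
  simp only [List.nil_append]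
  rw [List.pairwise_append]
  refine ⟨List.Pairwise.filter _ (PySem.List.pairwise_lt_pyRange_one _ _), ?_, ?_⟩
  · rw [List.pairwise_reverse]
    unfold pvLg
    rw [List.pairwise_map]
    apply List.Pairwise.imp_of_mem ?_ (List.Pairwise.filter _ (PySem.List.pairwise_lt_pyRange_one _ _))
    intro a b ha hb hab
    simp only [List.mem_filter, PySem.List.mem_pyRange_one, Bool.and_eq_true,
      decide_eq_true_iff, PySem.Int.mod_eq_zero_iff_dvd] at ha hb
    obtain ⟨⟨ha1, _⟩, ⟨hda, _⟩, _⟩ := ha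
    obtain ⟨⟨hb1, _⟩, ⟨hdb, _⟩, _⟩ := hb
    have hma := div_mul_cancel' ha1 hda
    have hmb := div_mul_cancel' hb1 hdb
    have hn : 1 ≤ n := by nlinarith
    have hpa := div_pos' hn ha1 hda
    have hpb := div_pos' hn hb1 hdb
    show PySem.Int.floordiv n b < PySem.Int.floordiv n a
    nlinarith
  · intro x hx y hy
    rw [List.mem_reverse] at hy
    unfold pvSm at hx
    unfold pvLg at hy
    simp only [List.mem_map, List.mem_filter, PySem.List.mem_pyRange_one, Bool.and_eq_true,
      decide_eq_true_iff, PySem.Int.mod_eq_zero_iff_dvd] at hx hy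
    obtain ⟨⟨hx1, _⟩, hdx, hxx⟩ := hx
    obtain ⟨dd, ⟨⟨hd1, _⟩, ⟨hdd, hddn⟩, hdne⟩, rfl⟩ := hy
    have hmul := div_mul_cancel' hd1 hdd
    have hn : 1 ≤ n := by nlinarith
    have hpos := div_pos' hn hd1 hdd
    by_contra hle
    push_neg at hle
    have hdt : dd < PySem.Int.floordiv n dd :=
      lt_of_le_of_ne (by nlinarith) hdne
    nlinarith [mul_lt_mul_of_pos_left hdt (show (0:ℤ) < PySem.Int.floordiv n dd by omega),
      mul_le_mul hle hle (by omega : (0:ℤ) ≤ PySem.Int.floordiv n dd) (by omega : (0:ℤ) ≤ x)]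

lemma pvDivisors_eq (n : Int) : pvDivisors n = pvDivList n := by
  by_cases hn : 1 ≤ n
  · have h2 : (pvDivList n).Pairwise (· < ·) :=
      List.Pairwise.filter _ (PySem.List.pairwise_lt_pyRange_one _ _)
    have h1 := pairwise_pvDivisors n
    have hm : ∀ x, x ∈ pvDivisors n ↔ x ∈ pvDivList n := by
      intro x
      rw [mem_pvDivisors hn]
      unfold pvDivList
      simp only [List.mem_filter, PySem.List.mem_pyRange_one, decide_eq_true_iff,
        PySem.Int.mod_eq_zero_iff_dvd]
      constructor
      · rintro ⟨hx1, hdvd⟩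
        exact ⟨⟨hx1, by have := Int.le_of_dvd (by omega) hdvd; omega⟩, hdvd⟩
      · rintro ⟨⟨hx1, _⟩, hdvd⟩
        exact ⟨hx1, hdvd⟩
    have hp : (pvDivisors n).Perm (pvDivList n) := by
      rw [List.perm_ext_iff_of_nodup h1.nodup h2.nodup]; exact hm
    exact hp.eq_of_pairwise (fun a b _ _ h h' => absurd h' (lt_asymm h)) h1 h2
  · have hA : pvDivisors n = [] := by
      unfold pvDivisors
      rw [pvDivisorsAux]
      rw [dif_neg (by nlinarith)]
      rfl
    have hB : pvDivList n = [] := by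
      unfold pvDivList
      rw [PySem.List.pyRange_one_eq_nil (by omega)]
      rfl
    rw [hA, hB]

theorem ordered_factorizations_3_eq (n : Int) :
    ordered_factorizations_3 n = ordered_factorizations_3_alt n := by
  unfold ordered_factorizations_3 ordered_factorizations_3_alt
  simp only [ite_not]
  rw [PySem.List.foldl_ite_eq_foldl_filter]
  have houter : ∀ (acc : List (List Int)),
      (pvDivList n).foldl (fun result a =>
        (PySem.List.pyRange 1 (PySem.Int.floordiv n a + 1) 1).foldl (fun result r =>
          if PySem.Int.mod (PySem.Int.floordiv n a) r = 0 then
            result ++ [[a, r, PySem.Int.floordiv (PySem.Int.floordiv n a) r]]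
          else result) result) acc
      = acc ++ (pvDivList n).flatMap (fun a =>
          (pvDivList (PySem.Int.floordiv n a)).map
            (fun r => [a, r, PySem.Int.floordiv (PySem.Int.floordiv n a) r])) := by
    intro acc
    rw [PySem.List.foldl_congr_mem (g := fun result a =>
        result ++ (pvDivList (PySem.Int.floordiv n a)).map
          (fun r => [a, r, PySem.Int.floordiv (PySem.Int.floordiv n a) r]))]
    · exact PySem.List.foldl_append_eq_flatMap _ _ _
    · intro acc' a _
      rw [PySem.List.foldl_append_ite
            (p := fun r => PySem.Int.mod (PySem.Int.floordiv n a) r = 0)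
            (f := fun r => [a, r, PySem.Int.floordiv (PySem.Int.floordiv n a) r])]
      rfl
  show (pvDivList n).foldl (fun result a =>
      (PySem.List.pyRange 1 (PySem.Int.floordiv n a + 1) 1).foldl (fun result r =>
        if PySem.Int.mod (PySem.Int.floordiv n a) r = 0 then
          result ++ [[a, r, PySem.Int.floordiv (PySem.Int.floordiv n a) r]]
        else result) result) [] = pvFactorTuples n 3
  rw [houter]
  simp only [pvFactorTuples, pvDivisors_eq, List.map_map, List.map_flatMap]
  simp [Function.comp]
  simp only [← List.map_eq_flatMap]

-- ===== VERDICT (by name: the statement is the Claim_ definition above) =====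
theorem ordered_factorizations_3_spec : Claim_equal_ordered_factorizations_3 := by
  intro n _
  unfold Spec_ordered_factorizations_3
  exact ordered_factorizations_3_eq n
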